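-- pv_equiv track=rewrite | github.com/AndrewChan2022/mylint | src/lint.py | _parse_function_params
-- ===== SOURCE A (Python) =====
-- def _parse_function_params(sig: str) -> list:
--     """Extract individual parameter strings from a function signature."""
--     depth = 0
--     start = None
--     end = None
--     for i, ch in enumerate(sig):
--         if ch == '(':
--             if depth == 0:
--                 start = i
--             depth += 1
--         elif ch == ')':
--             depth -= 1
--             if depth == 0:
--                 end = i
--                 break
--     if start is None or end is None:
--         return []
--     params_str = sig[start + 1:end]
--     if not params_str.strip():
--         return []
--     params = []
--     depth = 0
--     current = []
--     for ch in params_str: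
--         if ch in ('<', '('):
--             depth += 1
--         elif ch in ('>', ')'):
--             depth -= 1
--         if ch == ',' and depth == 0:
--             params.append(''.join(current).strip())
--             current = []
--         else:
--             current.append(ch)
--     if current:
--         params.append(''.join(current).strip())
--     return params
-- ===== SOURCE B (Python) =====
-- def _parse_function_params(sig: str) -> list:
--     """Extract individual parameter strings from a function signature (single forward scan)."""
--     params = []
--     buf = []
--     d = 0            # paren depth before entering the top-level group
--     inside = False
--     pdepth = 0       # paren nesting inside the group (0 = top level of the group)
--     sdepth = 0       # split depth: angles + parens
--     saw = False      # any non-whitespace char seen inside the group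
--     for ch in sig:
--         if not inside:
--             if ch == '(':
--                 if d == 0:
--                     inside = True
--                 else:
--                     d += 1
--             elif ch == ')':
--                 d -= 1
--         else:
--             if ch == ')' and pdepth == 0:
--                 if not saw:
--                     return []
--                 if buf:
--                     params.append(''.join(buf).strip())
--                 return params
--             if ch in ('<', '('):
--                 sdepth += 1
--             elif ch in ('>', ')'):
--                 sdepth -= 1
--             if ch == '(':
--                 pdepth += 1
--             elif ch == ')':
--                 pdepth -= 1
--             if ch == ',' and sdepth == 0:
--                 params.append(''.join(buf).strip())
--                 buf = []
--             else:
--                 buf.append(ch)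
--             if not ch.isspace():
--                 saw = True
--     return []
-- ===== Notes on version B (the rewrite author's own statement) =====
-- stated objective: alternative
-- what changed: Replaced A's two-pass design (first scan locating the outer paren group by index, then a slice and a second scan splitting it) by a single forward scan with an entry flag, a separate paren counter for the outer close and an angle+paren split counter, emitting stripped parameters on the fly.
import Mathlib
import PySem

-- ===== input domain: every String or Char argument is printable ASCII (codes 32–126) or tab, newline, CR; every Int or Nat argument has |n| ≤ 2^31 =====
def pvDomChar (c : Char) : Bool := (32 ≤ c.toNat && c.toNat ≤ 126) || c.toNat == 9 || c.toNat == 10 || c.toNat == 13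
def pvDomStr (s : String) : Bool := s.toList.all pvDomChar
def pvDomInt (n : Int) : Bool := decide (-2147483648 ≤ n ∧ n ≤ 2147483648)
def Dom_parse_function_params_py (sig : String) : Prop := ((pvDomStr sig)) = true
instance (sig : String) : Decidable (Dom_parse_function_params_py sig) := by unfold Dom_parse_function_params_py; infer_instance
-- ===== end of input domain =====

-- B replaces A's two passes (locate the paren group, then slice and split it) by one forward scan; objective: alternative single-pass decomposition.

-- ===== PORT A =====
-- first loop of A: enumerate(sig), finding start/end of the top-level paren group
def pfpLoop1 (cs : List Char) (i : Nat) (depth : Int) (start : Option Nat) :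
    Option Nat × Option Nat :=
  match cs with
  | [] => (start, none)
  | c :: rest =>
    if c = '(' then
      pfpLoop1 rest (i + 1) (depth + 1) (if depth = 0 then some i else start)
    else if c = ')' then
      if depth - 1 = 0 then (start, some i)
      else pfpLoop1 rest (i + 1) (depth - 1) start
    else pfpLoop1 rest (i + 1) depth start

-- second loop of A: split params_str at top-level commas (angle+paren depth)
def pfpLoop2 (cs : List Char) (params : List String) (depth : Int) (current : List Char) :
    List String × List Char :=
  match cs with
  | [] => (params, current)
  | c :: rest =>
    let depth := if c = '<' ∨ c = '(' then depth + 1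
                 else if c = '>' ∨ c = ')' then depth - 1 else depth
    if c = ',' ∧ depth = 0 then
      pfpLoop2 rest (params ++ [PySem.Str.strip (String.ofList current)]) depth []
    else
      pfpLoop2 rest params depth (current ++ [c])

def parse_function_params_py (sig : String) : List String :=
  let cs := sig.toList
  match pfpLoop1 cs 0 0 none with
  | (some s, some e) =>
      let params_str := PySem.List.slice cs (some ((s : Int) + 1)) (some (e : Int))
      if PySem.Chars.strip params_str = [] then []
      else
        let r := pfpLoop2 params_str [] 0 []
        if r.2 ≠ [] then r.1 ++ [PySem.Str.strip (String.ofList r.2)] else r.1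
  | _ => []

-- ===== PORT B =====
-- single forward scan (Source B): entry flag, outer-paren counter, split counter, buffer
def pfpAltGo (cs : List Char) (params : List String) (buf : List Char) (inside : Bool)
    (d : Int) (pdepth : Int) (sdepth : Int) (saw : Bool) : List String :=
  match cs with
  | [] => []
  | c :: rest =>
    if inside = false then
      if c = '(' then
        if d = 0 then pfpAltGo rest params buf true d pdepth sdepth saw
        else pfpAltGo rest params buf false (d + 1) pdepth sdepth saw
      else if c = ')' then pfpAltGo rest params buf false (d - 1) pdepth sdepth saw
      else pfpAltGo rest params buf false d pdepth sdepth saw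
    else
      if c = ')' ∧ pdepth = 0 then
        if saw = false then []
        else if buf ≠ [] then params ++ [PySem.Str.strip (String.ofList buf)] else params
      else
        let sdepth := if c = '<' ∨ c = '(' then sdepth + 1
                      else if c = '>' ∨ c = ')' then sdepth - 1 else sdepth
        let pdepth := if c = '(' then pdepth + 1 else if c = ')' then pdepth - 1 else pdepth
        let pb := if c = ',' ∧ sdepth = 0 then
                    (params ++ [PySem.Str.strip (String.ofList buf)], ([] : List Char))
                  else (params, buf ++ [c])
        pfpAltGo rest pb.1 pb.2 true d pdepth sdepth (saw || !PySem.Chars.isspace c)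

def parse_function_params_py_alt (sig : String) : List String :=
  pfpAltGo sig.toList [] [] false 0 0 0 false

-- ===== PRECONDITION & SPEC =====
def Spec_parse_function_params_py (sig : String) (out : List String) : Prop := out = parse_function_params_py_alt sig
instance (sig : String) (out : List String) : Decidable (Spec_parse_function_params_py sig out) := by unfold Spec_parse_function_params_py; infer_instance

-- ===== CLAIM (what is proved, stated in full; the proofs are below) =====
def Claim_equal_parse_function_params_py : Prop := ∀ (sig : String), Dom_parse_function_params_py sig → Spec_parse_function_params_py sig (parse_function_params_py sig)

-- ===== LEMMAS AND PROOFS =====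

-- the suffix after the entry '(' (proof helper mirroring A's first loop pre-entry phase)
def pvSkip (cs : List Char) (d : Int) : Option (List Char) :=
  match cs with
  | [] => none
  | c :: rest =>
      if c = '(' then (if d = 0 then some rest else pvSkip rest (d + 1))
      else if c = ')' then pvSkip rest (d - 1)
      else pvSkip rest d

-- the group content up to the matching ')' at paren depth p
def pvGrab (cs : List Char) (p : Nat) : Option (List Char) :=
  match cs with
  | [] => none
  | c :: rest =>
      if c = ')' then
        match p with
        | 0 => some []
        | q + 1 => (pvGrab rest q).map (c :: ·)
      else if c = '(' then (pvGrab rest (p + 1)).map (c :: ·)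
      else (pvGrab rest p).map (c :: ·)

theorem pv_map_congr (o : Option (List Char)) (a b : Nat) (h : a = b) :
    o.map (fun reg => a + reg.length) = o.map (fun reg => b + reg.length) := by
  subst h; rfl

theorem pv_key2 : ∀ (rest : List Char) (i p s : Nat),
    pfpLoop1 rest i ((p : Int) + 1) (some s) =
      (some s, (pvGrab rest p).map (fun reg => i + reg.length)) := by
  intro rest
  induction rest with
  | nil => intro i p s; simp [pfpLoop1, pvGrab]
  | cons c rest ih =>
    intro i p s
    by_cases hc1 : c = '('
    · subst hc1
      have h1 : ((p : Int) + 1 + 1) = ((p + 1 : Nat) : Int) + 1 := by push_cast; ring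
      simp only [pfpLoop1, if_true]
      rw [if_neg (by omega : ¬ ((p : Int) + 1 = 0)), h1, ih (i + 1) (p + 1) s]
      simp [pvGrab]
      cases hg : pvGrab rest (p + 1) with
      | none => simp
      | some reg => simp; omega
    · by_cases hc2 : c = ')'
      · subst hc2
        simp only [pfpLoop1, if_neg (by decide : ¬ (')' = '(')), if_true]
        cases p with
        | zero => simp [pvGrab]
        | succ q =>
          rw [if_neg (by omega : ¬ ((q + 1 : Nat) : Int) + 1 - 1 = 0)]
          have h1 : ((q + 1 : Nat) : Int) + 1 - 1 = ((q : Nat) : Int) + 1 := by push_cast; ring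
          rw [h1, ih (i + 1) q s]
          simp [pvGrab]
          cases hg : pvGrab rest q with
          | none => simp
          | some reg => simp; omega
      · simp only [pfpLoop1]
        rw [if_neg hc1, if_neg hc2, ih (i + 1) p s]
        simp [pvGrab, if_neg hc1, if_neg hc2]
        cases hg : pvGrab rest p with
        | none => simp
        | some reg => simp; omega

theorem pv_grab_decomp : ∀ (rest : List Char) (p : Nat) (reg : List Char),
    pvGrab rest p = some reg → ∃ suf, rest = reg ++ ')' :: suf := by
  intro rest
  induction rest with
  | nil => intro p reg h; simp [pvGrab] at h
  | cons c rest ih =>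
    intro p reg h
    by_cases hc1 : c = ')'
    · subst hc1
      cases p with
      | zero =>
        simp [pvGrab] at h
        exact ⟨rest, by simp [← h]⟩
      | succ q =>
        simp [pvGrab] at h
        obtain ⟨reg', hg, hr⟩ := h
        obtain ⟨suf, hs⟩ := ih q reg' hg
        exact ⟨suf, by simp [← hr, hs]⟩
    · by_cases hc2 : c = '('
      · subst hc2
        simp [pvGrab] at h
        obtain ⟨reg', hg, hr⟩ := h
        obtain ⟨suf, hs⟩ := ih (p + 1) reg' hg
        exact ⟨suf, by simp [← hr, hs]⟩
      · simp [pvGrab, hc1, hc2] at h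
        obtain ⟨reg', hg, hr⟩ := h
        obtain ⟨suf, hs⟩ := ih p reg' hg
        exact ⟨suf, by simp [← hr, hs]⟩

theorem pv_key1 : ∀ (cs : List Char) (i : Nat) (d : Int), d ≤ 0 →
    (pvSkip cs d = none → pfpLoop1 cs i d none = (none, none)) ∧
    (∀ rest, pvSkip cs d = some rest → ∃ pre : List Char, cs = pre ++ '(' :: rest ∧
        pfpLoop1 cs i d none = (some (i + pre.length),
          (pvGrab rest 0).map (fun reg => i + pre.length + 1 + reg.length))) := by
  intro cs
  induction cs with
  | nil => intro i d hd; constructor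
           · intro _; simp [pfpLoop1]
           · intro rest h; simp [pvSkip] at h
  | cons c cs ih =>
    intro i d hd
    by_cases hc1 : c = '('
    · subst hc1
      by_cases hd0 : d = 0
      · subst hd0
        constructor
        · intro h; simp [pvSkip] at h
        · intro rest h
          simp [pvSkip] at h
          subst h
          refine ⟨[], by simp, ?_⟩
          simp only [pfpLoop1, if_true, if_pos rfl]
          have h1 : (0 : Int) + 1 = ((0 : Nat) : Int) + 1 := by norm_num
          rw [h1, pv_key2 cs (i + 1) 0 i]
          simp
      · have hstep : pfpLoop1 ('(' :: cs) i d none = pfpLoop1 cs (i + 1) (d + 1) none := by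
          simp only [pfpLoop1, if_true, if_neg hd0]
        have hskip : pvSkip ('(' :: cs) d = pvSkip cs (d + 1) := by
          simp [pvSkip, hd0]
        obtain ⟨ihn, ihs⟩ := ih (i + 1) (d + 1) (by omega)
        constructor
        · intro h; rw [hskip] at h; rw [hstep]; exact ihn h
        · intro rest h
          rw [hskip] at h
          obtain ⟨pre, hpre, hloop⟩ := ihs rest h
          refine ⟨'(' :: pre, by simp [hpre], ?_⟩
          rw [hstep, hloop]
          simp only [List.length_cons, Prod.mk.injEq, Option.some.injEq]
          exact ⟨by omega, pv_map_congr _ _ _ (by omega)⟩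
    · by_cases hc2 : c = ')'
      · subst hc2
        have hstep : pfpLoop1 (')' :: cs) i d none = pfpLoop1 cs (i + 1) (d - 1) none := by
          simp only [pfpLoop1, if_neg (by decide : ¬ (')' = '(')), if_true]
          rw [if_neg (by omega : ¬ (d - 1 = 0))]
        have hskip : pvSkip (')' :: cs) d = pvSkip cs (d - 1) := by
          simp [pvSkip]
        obtain ⟨ihn, ihs⟩ := ih (i + 1) (d - 1) (by omega)
        constructor
        · intro h; rw [hskip] at h; rw [hstep]; exact ihn h
        · intro rest h
          rw [hskip] at h
          obtain ⟨pre, hpre, hloop⟩ := ihs rest h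
          refine ⟨')' :: pre, by simp [hpre], ?_⟩
          rw [hstep, hloop]
          simp only [List.length_cons, Prod.mk.injEq, Option.some.injEq]
          exact ⟨by omega, pv_map_congr _ _ _ (by omega)⟩
      · have hstep : pfpLoop1 (c :: cs) i d none = pfpLoop1 cs (i + 1) d none := by
          simp only [pfpLoop1, if_neg hc1, if_neg hc2]
        have hskip : pvSkip (c :: cs) d = pvSkip cs d := by
          simp [pvSkip, hc1, hc2]
        obtain ⟨ihn, ihs⟩ := ih (i + 1) d hd
        constructor
        · intro h; rw [hskip] at h; rw [hstep]; exact ihn h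
        · intro rest h
          rw [hskip] at h
          obtain ⟨pre, hpre, hloop⟩ := ihs rest h
          refine ⟨c :: pre, by simp [hpre], ?_⟩
          rw [hstep, hloop]
          simp only [List.length_cons, Prod.mk.injEq, Option.some.injEq]
          exact ⟨by omega, pv_map_congr _ _ _ (by omega)⟩

theorem pv_key0 : ∀ (cs : List Char) (d : Int),
    pfpAltGo cs [] [] false d 0 0 false =
      (match pvSkip cs d with
       | none => []
       | some rest => pfpAltGo rest [] [] true 0 0 0 false) := by
  intro cs
  induction cs with
  | nil => intro d; simp [pfpAltGo, pvSkip]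
  | cons c cs ih =>
    intro d
    by_cases hc1 : c = '('
    · subst hc1
      by_cases hd0 : d = 0
      · subst hd0; simp [pfpAltGo, pvSkip]
      · simp only [pfpAltGo, pvSkip, if_true, if_neg hd0]
        exact ih (d + 1)
    · by_cases hc2 : c = ')'
      · subst hc2
        simp only [pfpAltGo, pvSkip, if_neg (by decide : ¬ (')' = '(')), if_true,
          if_neg (by decide : ¬ ((false : Bool) = true))]
        exact ih (d - 1)
      · simp only [pfpAltGo, pvSkip, if_neg hc1, if_neg hc2,
          if_neg (by decide : ¬ ((false : Bool) = true))]
        exact ih d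

theorem pv_key3n : ∀ (rest : List Char) (p : Nat) (params : List String) (buf : List Char)
    (sdepth : Int) (saw : Bool) (d : Int), pvGrab rest p = none →
    pfpAltGo rest params buf true d (p : Int) sdepth saw = [] := by
  intro rest
  induction rest with
  | nil => intro p params buf sdepth saw d _; simp [pfpAltGo]
  | cons c rest ih =>
    intro p params buf sdepth saw d h
    by_cases hc1 : c = ')'
    · subst hc1
      cases p with
      | zero => simp [pvGrab] at h
      | succ q =>
        simp [pvGrab] at h
        have hq : ¬ (((q + 1 : Nat) : Int) = 0) := by push_cast; omega
        simp only [pfpAltGo]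
        simp [hq]
        rw [if_neg (by omega : ¬ ((q : Int) + 1 = 0))]
        exact ih q _ _ _ _ _ h
    · by_cases hc2 : c = '('
      · subst hc2
        simp [pvGrab] at h
        simp only [pfpAltGo]
        simp
        rw [show (p : Int) + 1 = ((p + 1 : Nat) : Int) by push_cast; ring]
        exact ih (p + 1) _ _ _ _ _ h

      · simp [pvGrab, hc1, hc2] at h
        simp only [pfpAltGo]
        simp [hc1, hc2]
        split
        · exact ih p _ _ _ _ _ h
        · exact ih p _ _ _ _ _ h

theorem pv_key3 : ∀ (rest : List Char) (p : Nat) (reg : List Char), pvGrab rest p = some reg →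
    ∀ (params : List String) (buf : List Char) (sdepth : Int) (saw : Bool) (d : Int),
    pfpAltGo rest params buf true d (p : Int) sdepth saw =
      (if (saw || reg.any (fun c => !PySem.Chars.isspace c)) = false then []
       else if (pfpLoop2 reg params sdepth buf).2 ≠ [] then
         (pfpLoop2 reg params sdepth buf).1 ++
           [PySem.Str.strip (String.ofList (pfpLoop2 reg params sdepth buf).2)]
       else (pfpLoop2 reg params sdepth buf).1) := by
  intro rest
  induction rest with
  | nil => intro p reg h; simp [pvGrab] at h
  | cons c rest ih =>
    intro p reg h params buf sdepth saw d
    by_cases hc1 : c = ')'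
    · subst hc1
      cases p with
      | zero =>
        simp [pvGrab] at h
        subst h
        simp [pfpAltGo, pfpLoop2]
      | succ q =>
        simp [pvGrab] at h
        obtain ⟨reg', hg, hr⟩ := h
        subst hr
        have hq : ¬ (((q + 1 : Nat) : Int) = 0) := by push_cast; omega
        simp only [pfpAltGo]
        simp [hq]
        rw [if_neg (by omega : ¬ ((q : Int) + 1 = 0))]
        rw [ih q reg' hg]
        simp [pfpLoop2, Bool.or_assoc]
    · by_cases hc2 : c = '('
      · subst hc2
        simp [pvGrab] at h
        obtain ⟨reg', hg, hr⟩ := h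
        subst hr
        simp only [pfpAltGo]
        simp
        rw [show (p : Int) + 1 = ((p + 1 : Nat) : Int) by push_cast; ring]
        rw [ih (p + 1) reg' hg]
        simp [pfpLoop2, Bool.or_assoc]
      · simp [pvGrab, hc1, hc2] at h
        obtain ⟨reg', hg, hr⟩ := h
        subst hr
        simp only [pfpAltGo, if_neg (show ¬ ((true : Bool) = false) by decide)]
        rw [if_neg (show ¬ (c = ')' ∧ (p : Int) = 0) from by simp [hc1])]
        rw [if_neg hc2, if_neg hc1]
        rw [ih p reg' hg]
        simp only [pfpLoop2]
        by_cases hcm : c = ',' ∧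
            (if c = '<' ∨ c = '(' then sdepth + 1
             else if c = '>' ∨ c = ')' then sdepth - 1 else sdepth) = 0
        · rw [if_pos hcm, if_pos hcm]
          simp [Bool.or_assoc]
        · rw [if_neg hcm, if_neg hcm]
          simp [Bool.or_assoc]

theorem pv_strip_nil (reg : List Char) :
    PySem.Chars.strip reg = [] ↔ reg.any (fun c => !PySem.Chars.isspace c) = false := by
  simp only [PySem.Chars.strip, PySem.Chars.lstrip, PySem.Chars.rstrip,
    List.reverse_eq_nil_iff, List.dropWhile_eq_nil_iff, List.mem_reverse,
    List.any_eq_false, Bool.not_eq_true']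
  constructor
  · intro h x hx
    have hx2 : x ∈ List.takeWhile PySem.Chars.isspace reg ++ List.dropWhile PySem.Chars.isspace reg := by
      rw [List.takeWhile_append_dropWhile]; exact hx
    rcases List.mem_append.mp hx2 with hx' | hx'
    · simpa using List.mem_takeWhile_imp hx'
    · simpa using h x hx'
  · intro h x hx
    have := h x ((List.dropWhile_sublist _).subset hx)
    simp at this
    simp [this]

-- ===== VERDICT (by name: the statement is the Claim_ definition above) =====
theorem parse_function_params_py_spec : Claim_equal_parse_function_params_py := by
  unfold Claim_equal_parse_function_params_py
  intro sig _
  unfold Spec_parse_function_params_py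
  have hA : parse_function_params_py sig =
      (match pfpLoop1 sig.toList 0 0 none with
       | (some s, some e) =>
           if PySem.Chars.strip
               (PySem.List.slice sig.toList (some ((s : Int) + 1)) (some (e : Int))) = [] then []
           else
             if (pfpLoop2 (PySem.List.slice sig.toList (some ((s : Int) + 1)) (some (e : Int))) [] 0 []).2 ≠ [] then
               (pfpLoop2 (PySem.List.slice sig.toList (some ((s : Int) + 1)) (some (e : Int))) [] 0 []).1 ++
                 [PySem.Str.strip (String.ofList
                   (pfpLoop2 (PySem.List.slice sig.toList (some ((s : Int) + 1)) (some (e : Int))) [] 0 []).2)]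
             else (pfpLoop2 (PySem.List.slice sig.toList (some ((s : Int) + 1)) (some (e : Int))) [] 0 []).1
       | _ => []) := rfl
  rw [hA, show parse_function_params_py_alt sig = pfpAltGo sig.toList [] [] false 0 0 0 false from rfl]
  rw [pv_key0 sig.toList 0]
  cases hs : pvSkip sig.toList 0 with
  | none =>
    have h := (pv_key1 sig.toList 0 0 (by omega)).1 hs
    rw [h]
  | some rest =>
    obtain ⟨pre, hpre, hloop⟩ := (pv_key1 sig.toList 0 0 (by omega)).2 rest hs
    rw [hloop]
    cases hg : pvGrab rest 0 with
    | none =>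
      simp only [hg, Option.map_none]
      exact (pv_key3n rest 0 [] [] 0 false 0 hg).symm
    | some reg =>
      simp only [hg, Option.map_some]
      obtain ⟨suf, hsuf⟩ := pv_grab_decomp rest 0 reg hg
      have hslice : PySem.List.slice sig.toList (some (((0 + pre.length : Nat) : Int) + 1))
          (some ((0 + pre.length + 1 + reg.length : Nat) : Int)) = reg := by
        rw [show (((0 + pre.length : Nat) : Int)) + 1 = ((pre.length + 1 : Nat) : Int) by push_cast; ring]
        rw [show ((0 + pre.length + 1 + reg.length : Nat) : Int)
              = ((pre.length + 1 + reg.length : Nat) : Int) by push_cast; ring]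
        rw [PySem.List.slice_natCast]
        rw [hpre, show pre ++ '(' :: rest = (pre ++ ['(']) ++ rest by simp]
        rw [show pre.length + 1 = (pre ++ ['(']).length by simp]
        rw [List.drop_left]
        rw [hsuf]
        rw [show (pre ++ ['(']).length + reg.length - (pre ++ ['(']).length = reg.length by omega]
        simp
      rw [hslice]
      have hk := pv_key3 rest 0 reg hg [] [] 0 false 0
      simp only [Nat.cast_zero] at hk
      rw [hk]
      have hiff : (PySem.Chars.strip reg = []) ↔
          ((false || reg.any fun c => !PySem.Chars.isspace c) = false) := by
        simpa using pv_strip_nil reg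
      by_cases hstrip : PySem.Chars.strip reg = []
      · rw [if_pos hstrip, if_pos (hiff.mp hstrip)]
      · rw [if_neg hstrip, if_neg (fun h => hstrip (hiff.mpr h))]
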